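-- pv_equiv track=rewrite | github.com/Sbenziane/myo-gesture-detection | train/util.py | select_file
-- ===== SOURCE A (Python) =====
-- def select_file(idx, filedata):
--     line_count = 0
--     last_len = 0
--     last_file = ''
--     for file_path, line_len in filedata:
--         line_count += line_len
--         if idx+1 <= line_count:
--             last_len = line_len
--             last_file = file_path
--             break
--     line_num = idx - (line_count - last_len)
--
--     return last_file, line_num
-- ===== SOURCE B (Python) =====
-- def select_file(idx, filedata):
--     def go(offset, items):
--         if not items:
--             return '', idx - offset
--         (file_path, line_len), rest = items[0], items[1:]
--         if idx - offset < line_len: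
--             return file_path, idx - offset
--         return go(offset + line_len, rest)
--     return go(0, filedata)
-- ===== Notes on version B (the rewrite author's own statement) =====
-- stated objective: simpler
-- what changed: Replaces the stateful accumulate-then-break loop and its leftover line_count/last_len/last_file variables with a structural recursion carrying a single running offset, returning (file, idx - offset) directly at the matching file.
import Mathlib
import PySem

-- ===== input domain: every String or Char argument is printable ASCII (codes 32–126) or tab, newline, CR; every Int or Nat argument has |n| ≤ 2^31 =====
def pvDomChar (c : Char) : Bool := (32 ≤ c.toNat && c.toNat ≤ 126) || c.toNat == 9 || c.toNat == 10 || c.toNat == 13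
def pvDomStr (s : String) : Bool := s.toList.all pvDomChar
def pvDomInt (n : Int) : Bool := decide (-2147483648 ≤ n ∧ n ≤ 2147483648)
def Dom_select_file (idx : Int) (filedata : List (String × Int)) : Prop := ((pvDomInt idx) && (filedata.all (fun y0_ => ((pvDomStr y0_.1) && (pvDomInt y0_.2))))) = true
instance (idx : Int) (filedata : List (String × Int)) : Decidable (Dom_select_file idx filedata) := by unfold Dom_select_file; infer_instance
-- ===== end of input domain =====

-- B replaces A's accumulate-then-break loop (with its leftover line_count/last_len/last_file
-- state) by a structural recursion carrying one running offset; objective: simpler.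

-- ===== PORT A =====
-- the for-loop with break, over state (line_count, last_len, last_file)
def selectLoop_A (idx : Int) : List (String × Int) → Int → Int → String → Int × Int × String
  | [], line_count, last_len, last_file => (line_count, last_len, last_file)
  | (file_path, line_len) :: rest, line_count, last_len, last_file =>
      let line_count' := line_count + line_len
      if idx + 1 ≤ line_count' then (line_count', line_len, file_path)   -- break
      else selectLoop_A idx rest line_count' last_len last_file

def select_file (idx : Int) (filedata : List (String × Int)) : String × Int :=
  let r := selectLoop_A idx filedata 0 0 ""
  (r.2.2, idx - (r.1 - r.2.1))

-- ===== PORT B =====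
def go_B (idx : Int) (offset : Int) : List (String × Int) → String × Int
  | [] => ("", idx - offset)
  | (file_path, line_len) :: rest =>
      if idx - offset < line_len then (file_path, idx - offset)
      else go_B idx (offset + line_len) rest

def select_file_alt (idx : Int) (filedata : List (String × Int)) : String × Int :=
  go_B idx 0 filedata

-- ===== PRECONDITION & SPEC =====
def Spec_select_file (idx : Int) (filedata : List (String × Int)) (out : String × Int) : Prop := out = select_file_alt idx filedata
instance (idx : Int) (filedata : List (String × Int)) (out : String × Int) : Decidable (Spec_select_file idx filedata out) := by unfold Spec_select_file; infer_instance

-- ===== CLAIM (what is proved, stated in full; the proofs are below) =====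
def Claim_equal_select_file : Prop := ∀ (idx : Int) (filedata : List (String × Int)), Dom_select_file idx filedata → Spec_select_file idx filedata (select_file idx filedata)

-- ===== LEMMAS AND PROOFS =====
lemma loop_eq (idx : Int) : ∀ (l : List (String × Int)) (lc : Int),
    (let r := selectLoop_A idx l lc 0 ""; ((r.2.2, idx - (r.1 - r.2.1)) : String × Int))
      = go_B idx lc l := by
  intro l
  induction l with
  | nil => intro lc; simp [selectLoop_A, go_B]
  | cons hd tl ih =>
      intro lc
      obtain ⟨fp, ll⟩ := hd
      simp only [selectLoop_A, go_B]
      by_cases h : idx + 1 ≤ lc + ll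
      · rw [if_pos h, if_pos (by omega)]
        simp
      · rw [if_neg h, if_neg (by omega)]
        exact ih (lc + ll)

-- ===== VERDICT (by name: the statement is the Claim_ definition above) =====
theorem select_file_spec : Claim_equal_select_file := by
  intro idx filedata _
  unfold Spec_select_file select_file select_file_alt
  exact loop_eq idx filedata 0
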